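-- pv_equiv track=rewrite | github.com/nana1243/Algorithm | python/programmers/StackQue/주식가격.py | solution
-- ===== SOURCE A (Python) =====
-- def solution(prices):
--
--     def f(n):
--         cnt=0
--         for i in range(n+1, len(prices)):
--             if prices[n]>prices[i]:
--                 cnt+=1
--                 break
--             else:
--                 cnt+=1
--         return cnt
--
--     answer=[]
--     for i in range(0,len(prices)-1):
--         result=f(i)
--         answer.append(result)
--     answer.append(0)
--     return answer
-- ===== SOURCE B (Python) =====
-- def solution(prices):
--     # Monotonic stack: O(n) instead of A's O(n^2) nested scan.
--     # (Intended difference: on the empty list A returns [0]; this returns [].)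
--     n = len(prices)
--     answer = [0] * n
--     stack = []
--     for i in range(n):
--         while stack and prices[stack[-1]] > prices[i]:
--             j = stack.pop()
--             answer[j] = i - j
--         stack.append(i)
--     for j in stack:
--         answer[j] = n - 1 - j
--     return answer
-- ===== Notes on version B (the rewrite author's own statement) =====
-- stated objective: faster
-- what changed: Replaces A's per-index forward rescan (for each i, scan ahead until a smaller price) by a single pass with a monotonic stack of pending indices, resolving each index exactly once.
-- intended difference: On the empty list A returns [0] because it unconditionally appends a trailing 0 even when there is no last element; B returns [], the intended answer (one duration per price). — e.g. on solution([]): A returns [0], B returns []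
import Mathlib
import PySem

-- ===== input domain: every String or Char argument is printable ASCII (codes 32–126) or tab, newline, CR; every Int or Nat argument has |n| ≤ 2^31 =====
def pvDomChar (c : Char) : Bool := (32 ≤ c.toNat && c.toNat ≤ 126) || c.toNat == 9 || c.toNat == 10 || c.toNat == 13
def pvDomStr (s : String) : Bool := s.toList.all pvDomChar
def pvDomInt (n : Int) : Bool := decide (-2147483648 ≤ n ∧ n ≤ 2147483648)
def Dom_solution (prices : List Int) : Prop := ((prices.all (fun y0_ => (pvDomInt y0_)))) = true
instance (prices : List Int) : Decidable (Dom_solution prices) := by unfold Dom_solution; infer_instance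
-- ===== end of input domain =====

-- B replaces A's quadratic per-index forward rescan by a single-pass monotonic stack;
-- on the empty list A returns [0] (unconditional trailing append) while B returns the intended [].


-- ===== PORT A =====
-- inner loop of f: 'for i in range(n+1, len(prices)): …' with break; all indices are in
-- range, so pyGetD is exact here.
def solA_go (prices : List Int) (n : Int) : List Int → Int → Int
  | [], cnt => cnt
  | i :: rest, cnt =>
    if PySem.List.pyGetD prices n 0 > PySem.List.pyGetD prices i 0 then cnt + 1
    else solA_go prices n rest (cnt + 1)

def solA_f (prices : List Int) (n : Int) : Int :=
  solA_go prices n (PySem.List.pyRange (n + 1) (prices.length : Int) 1) 0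

def solution (prices : List Int) : List Int :=
  ((PySem.List.pyRange 0 ((prices.length : Int) - 1) 1).foldl
      (fun acc i => acc ++ [solA_f prices i]) []) ++ [0]

-- ===== PORT B =====
-- the 'while stack and prices[stack[-1]] > prices[i]' loop; the stack of indices is kept
-- head-first (head = Python's stack[-1]); all indices are in range, so getD is exact.
def altPop (prices : List Int) (i : Nat) : List Nat → List Int → List Nat × List Int
  | [], answer => ([], answer)
  | j :: rest, answer =>
    if prices.getD j 0 > prices.getD i 0 then
      altPop prices i rest (answer.set j ((i : Int) - (j : Int)))
    else (j :: rest, answer)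

-- 'for i in range(n): …'
def altMain (prices : List Int) : List Nat → List Nat → List Int → List Nat × List Int
  | [], stack, answer => (stack, answer)
  | i :: is, stack, answer =>
    let r := altPop prices i stack answer
    altMain prices is (i :: r.1) r.2

-- 'for j in stack: answer[j] = n - 1 - j'
def altFlush (n : Nat) : List Nat → List Int → List Int
  | [], answer => answer
  | j :: rest, answer => altFlush n rest (answer.set j ((n : Int) - 1 - (j : Int)))

def solution_alt (prices : List Int) : List Int :=
  let n := prices.length
  let r := altMain prices (List.range n) [] (List.replicate n 0)
  altFlush n r.1 r.2

-- ===== PRECONDITION & SPEC =====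
-- On the empty list A returns [0] (it appends a trailing 0 unconditionally); B returns [],
-- the intended answer: one duration per price.
def D_solution (prices : List Int) : Prop := prices = []
instance (prices : List Int) : Decidable (D_solution prices) := by unfold D_solution; infer_instance

def Spec_solution (prices : List Int) (out : List Int) : Prop :=
  ¬ D_solution prices → out = solution_alt prices
instance (prices : List Int) (out : List Int) : Decidable (Spec_solution prices out) := by
  unfold Spec_solution; infer_instance

def pvDiffWitness_solution : List Int := []
def pvDiffWitnessOut_solution : (List Int) × (List Int) := ([0], [])

-- ===== CLAIM (what is proved, stated in full; the proofs are below) =====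
def Claim_unchanged_solution : Prop :=
  ∀ (prices : List Int), Dom_solution prices → Spec_solution prices (solution prices)
def Claim_changed_solution : Prop :=
  Dom_solution (pvDiffWitness_solution) ∧ D_solution (pvDiffWitness_solution) ∧
  solution (pvDiffWitness_solution) = pvDiffWitnessOut_solution.1 ∧
  solution_alt (pvDiffWitness_solution) = pvDiffWitnessOut_solution.2 ∧
  pvDiffWitnessOut_solution.1 ≠ pvDiffWitnessOut_solution.2
def Claim_exact_solution : Prop :=
  ∀ (prices : List Int), Dom_solution prices → D_solution prices →
    solution prices ≠ solution_alt prices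

-- ===== LEMMAS AND PROOFS =====

-- getD/set helpers
lemma getD_set_ne' (l : List Int) (i j : Nat) (v : Int) (h : i ≠ j) :
    (l.set i v).getD j 0 = l.getD j 0 := by
  simp [List.getD_eq_getElem?_getD, List.getElem?_set_ne h]

lemma getD_set_self' (l : List Int) (i : Nat) (v : Int) (h : i < l.length) :
    (l.set i v).getD i 0 = v := by
  simp [List.getD_eq_getElem?_getD, h]

-- The common specification: duration until the first strictly smaller later price.
def cntBrk (x : Int) : List Int → Int
  | [] => 0
  | q :: rest => if q < x then 1 else 1 + cntBrk x rest

def dur (p : List Int) (j : Nat) : Int := cntBrk (p.getD j 0) (p.drop (j + 1))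

def NoDrop (p : List Int) (j i : Nat) : Prop :=
  ∀ k, j < k → k < i → p.getD j 0 ≤ p.getD k 0

def stkRel (p : List Int) (a b : Nat) : Prop := b < a ∧ p.getD b 0 ≤ p.getD a 0

def StkInv (p : List Int) (i : Nat) (stack : List Nat) (answer : List Int) : Prop :=
  answer.length = p.length ∧
  (∀ j, j ∈ stack ↔ (j < i ∧ NoDrop p j i)) ∧
  stack.Pairwise (stkRel p) ∧
  (∀ j, j < i → ¬ NoDrop p j i → answer.getD j 0 = dur p j)

-- ---- cntBrk / dur facts ----
lemma cntBrk_of_all_ge (x : Int) (l : List Int) (h : ∀ q ∈ l, x ≤ q) :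
    cntBrk x l = (l.length : Int) := by
  induction l with
  | nil => simp [cntBrk]
  | cons q rest ih =>
    have hq := h q (by simp)
    have hnlt : ¬ q < x := by omega
    simp only [cntBrk, hnlt, if_false, ih (fun q hq => h q (by simp [hq])), List.length_cons]
    push_cast; ring

lemma cntBrk_first (x : Int) (l : List Int) (k : Nat) (hk : k < l.length)
    (hpre : ∀ m, m < k → x ≤ l.getD m 0) (hd : l.getD k 0 < x) :
    cntBrk x l = (k : Int) + 1 := by
  induction l generalizing k with
  | nil => simp at hk
  | cons q rest ih =>
    cases k with
    | zero =>
      simp [List.getD] at hd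
      simp [cntBrk, hd]
    | succ k =>
      have hq : x ≤ q := by simpa [List.getD] using hpre 0 (by omega)
      have hnlt : ¬ q < x := by omega
      simp only [cntBrk, hnlt, if_false]
      have := ih k (by simpa using hk)
        (fun m hm => by simpa [List.getD] using hpre (m + 1) (by omega))
        (by simpa [List.getD] using hd)
      rw [this]; push_cast; ring

lemma getD_drop (p : List Int) (a m : Nat) :
    (p.drop a).getD m 0 = p.getD (a + m) 0 := by
  simp [List.getD_eq_getElem?_getD, List.getElem?_drop]

lemma dur_eq_of_nodrop (p : List Int) (j : Nat) (hj : j < p.length)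
    (h : NoDrop p j p.length) : dur p j = (p.length : Int) - 1 - (j : Int) := by
  unfold dur
  rw [cntBrk_of_all_ge]
  · simp only [List.length_drop]; omega
  · intro q hq
    obtain ⟨m, hm, rfl⟩ := List.mem_iff_getElem.mp hq
    have hml : j + 1 + m < p.length := by
      have := hm; simp only [List.length_drop] at this; omega
    have heq : (p.drop (j + 1))[m] = (p.drop (j + 1)).getD m 0 := by
      simp [List.getD_eq_getElem?_getD, List.getElem?_eq_getElem hm]
    rw [heq, getD_drop]
    exact h _ (by omega) (by omega)

lemma dur_eq_of_drop_at (p : List Int) (j i : Nat) (hi : i < p.length) (hj : j < i)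
    (hnd : NoDrop p j i) (hlt : p.getD i 0 < p.getD j 0) :
    dur p j = (i : Int) - (j : Int) := by
  unfold dur
  rw [cntBrk_first (p.getD j 0) _ (i - (j + 1))
      (by simp only [List.length_drop]; omega)
      (fun m hm => by rw [getD_drop]; exact hnd _ (by omega) (by omega))
      (by rw [getD_drop]
          have heq : j + 1 + (i - (j + 1)) = i := by omega
          rw [heq]; exact hlt)]
  omega

-- ---- A-side: solution = map dur ----
lemma solA_go_spec (p : List Int) (j : Nat) : ∀ (a : Nat) (cnt : Int),
    solA_go p (j : Int) ((PySem.List.pyRange (a : Int) (p.length : Int) 1)) cnt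
      = cnt + cntBrk (p.getD j 0) (p.drop a) := by
  intro a cnt
  induction h : p.length - a generalizing a cnt with
  | zero =>
    have hba : (p.length : Int) ≤ (a : Int) := by omega
    rw [PySem.List.pyRange_one_eq_nil hba]
    have hnil : p.drop a = [] := List.drop_eq_nil_of_le (by omega)
    rw [hnil]
    simp [solA_go, cntBrk]
  | succ m ih =>
    have hal : a < p.length := by omega
    have hab : (a : Int) < (p.length : Int) := by omega
    rw [PySem.List.pyRange_one_cons hab]
    have hgd : p.getD a 0 = p[a] := by
      simp [List.getD_eq_getElem?_getD, List.getElem?_eq_getElem hal]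
    have hdrop : p.drop a = p.getD a 0 :: p.drop (a + 1) := by
      rw [hgd]; exact List.drop_eq_getElem_cons hal
    simp only [solA_go, PySem.List.pyGetD_natCast, hdrop, cntBrk]
    split_ifs with hlt
    · ring
    · have h1 : ((a : Int) + 1) = ((a + 1 : Nat) : Int) := by push_cast; ring
      rw [h1, ih (a + 1) (cnt + 1) (by omega)]
      ring

lemma solA_f_eq_dur (p : List Int) (j : Nat) :
    solA_f p (j : Int) = dur p j := by
  unfold solA_f dur
  have h1 : ((j : Int) + 1) = ((j + 1 : Nat) : Int) := by push_cast; ring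
  rw [h1, solA_go_spec p j (j + 1) 0]
  ring

lemma solution_eq_map (p : List Int) (hp : p ≠ []) :
    solution p = (List.range p.length).map (dur p) := by
  unfold solution
  have hn : 1 ≤ p.length := List.length_pos_of_ne_nil hp
  rw [PySem.List.foldl_append_singleton_eq_map, PySem.List.pyRange_one]
  have h1 : ((p.length : Int) - 1 - 0).toNat = p.length - 1 := by omega
  rw [h1, List.map_map]
  conv_rhs => rw [show p.length = (p.length - 1) + 1 by omega, List.range_succ]
  rw [List.map_append, List.nil_append]
  congr 1
  · apply List.map_congr_left
    intro k hk
    simp only [Function.comp_apply]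
    rw [show ((0 : Int) + (k : Int)) = (k : Int) by ring, solA_f_eq_dur p k]
  · simp only [List.map_cons, List.map_nil]
    rw [dur_eq_of_nodrop p (p.length - 1) (by omega) (fun k hk1 hk2 => by omega)]
    congr 1
    omega

-- ---- B-side: the pop loop ----
lemma altPop_spec (p : List Int) (i : Nat) (stack : List Nat) (answer : List Int)
    (hpw : stack.Pairwise (stkRel p)) (hlen : ∀ j ∈ stack, j < answer.length) :
    (altPop p i stack answer).1 <:+ stack ∧
    (∀ j, j ∈ (altPop p i stack answer).1 ↔ (j ∈ stack ∧ p.getD j 0 ≤ p.getD i 0)) ∧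
    (altPop p i stack answer).2.length = answer.length ∧
    (∀ j, (j ∉ stack ∨ j ∈ (altPop p i stack answer).1) →
        (altPop p i stack answer).2.getD j 0 = answer.getD j 0) ∧
    (∀ j ∈ stack, j ∉ (altPop p i stack answer).1 →
        (altPop p i stack answer).2.getD j 0 = (i : Int) - (j : Int)) := by
  induction stack generalizing answer with
  | nil =>
    simp [altPop]
  | cons j rest ih =>
    have hjrest : j ∉ rest := by
      intro hm
      have := (List.pairwise_cons.mp hpw).1 j hm
      exact absurd this.1 (by omega)
    by_cases hgt : p.getD j 0 > p.getD i 0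
    · simp only [altPop, if_pos hgt]
      obtain ⟨ih1, ih2, ih3, ih4, ih5⟩ :=
        ih (answer.set j ((i : Int) - (j : Int)))
          (List.pairwise_cons.mp hpw).2
          (fun j' hj' => by
            rw [List.length_set]; exact hlen j' (List.mem_cons_of_mem _ hj'))
      refine ⟨ih1.trans (List.suffix_cons j rest), ?_, ?_, ?_, ?_⟩
      · intro j'
        rw [ih2 j']
        constructor
        · rintro ⟨hm, hle⟩; exact ⟨List.mem_cons_of_mem _ hm, hle⟩
        · rintro ⟨hm, hle⟩
          rcases List.mem_cons.mp hm with rfl | hm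
          · omega
          · exact ⟨hm, hle⟩
      · rw [ih3, List.length_set]
      · intro j' hj'
        have hne : j' ≠ j := by
          rcases hj' with hj' | hj'
          · intro heq; exact hj' (heq ▸ List.mem_cons_self)
          · intro heq
            exact hjrest (heq ▸ ih1.subset hj')
        rw [ih4 j' (by
          rcases hj' with hj' | hj'
          · exact Or.inl (fun hm => hj' (List.mem_cons_of_mem _ hm))
          · exact Or.inr hj')]
        exact getD_set_ne' answer j j' _ (Ne.symm hne)
      · intro j' hj' hnot
        rcases List.mem_cons.mp hj' with rfl | hm
        · rw [ih4 j' (Or.inl hjrest)]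
          exact getD_set_self' answer j' _ (hlen j' List.mem_cons_self)
        · exact ih5 j' hm hnot
    · have hstep : altPop p i (j :: rest) answer = (j :: rest, answer) := by
        simp only [altPop]
        rw [if_neg hgt]
      rw [hstep]
      have hall : ∀ j' ∈ j :: rest, p.getD j' 0 ≤ p.getD i 0 := by
        intro j' hj'
        rcases List.mem_cons.mp hj' with rfl | hm
        · omega
        · have := (List.pairwise_cons.mp hpw).1 j' hm
          have h2 := this.2
          omega
      exact ⟨List.suffix_refl _, fun j' => ⟨fun h => ⟨h, hall j' h⟩, fun h => h.1⟩,
        rfl, fun _ _ => rfl, fun j' hj' hnot => absurd hj' hnot⟩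

-- ---- B-side: main loop preserves the invariant ----
lemma altMain_inv (p : List Int) : ∀ (cnt i : Nat) (stack : List Nat) (answer : List Int),
    i + cnt = p.length → StkInv p i stack answer →
    StkInv p p.length (altMain p (List.range' i cnt) stack answer).1
      (altMain p (List.range' i cnt) stack answer).2 := by
  intro cnt
  induction cnt with
  | zero =>
    intro i stack answer hi hinv
    have hieq : i = p.length := by omega
    subst hieq
    simpa [altMain] using hinv
  | succ m ih =>
    intro i stack answer hi hinv
    obtain ⟨hL, hS, hP, hA⟩ := hinv
    have hin : i < p.length := by omega
    obtain ⟨q1, q2, q3, q4, q5⟩ := altPop_spec p i stack answer hP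
      (fun j hj => by
        have := (hS j).mp hj
        omega)
    rw [List.range'_succ]
    simp only [altMain]
    apply ih (i + 1) _ _ (by omega)
    set r := altPop p i stack answer with hr
    refine ⟨by rw [q3, hL], ?_, ?_, ?_⟩
    · -- membership characterization at i+1
      intro j
      constructor
      · intro hj
        rcases List.mem_cons.mp hj with rfl | hm
        · exact ⟨by omega, fun k hk1 hk2 => by omega⟩
        · obtain ⟨hms, hle⟩ := (q2 j).mp hm
          obtain ⟨hji, hnd⟩ := (hS j).mp hms
          refine ⟨by omega, fun k hk1 hk2 => ?_⟩
          by_cases hki : k = i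
          · subst hki; exact hle
          · exact hnd k hk1 (by omega)
      · rintro ⟨hji, hnd⟩
        by_cases hje : j = i
        · simp [hje]
        · have hji' : j < i := by omega
          have hmr : j ∈ r.1 := (q2 j).mpr
            ⟨(hS j).mpr ⟨hji', fun k hk1 hk2 => hnd k hk1 (by omega)⟩,
              hnd i (by omega) (by omega)⟩
          exact List.mem_cons_of_mem _ hmr
    · -- pairwise
      refine List.pairwise_cons.mpr ⟨?_, List.Pairwise.sublist q1.sublist hP⟩
      intro j hj
      obtain ⟨hms, hle⟩ := (q2 j).mp hj
      exact ⟨((hS j).mp hms).1, hle⟩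
    · -- answers
      intro j hji hnd
      by_cases hje : j = i
      · subst hje
        exact absurd (fun k hk1 hk2 => by omega) hnd
      · have hji' : j < i := by omega
        by_cases hold : NoDrop p j i
        · -- the drop happens exactly at step i
          have hmem : j ∈ stack := (hS j).mpr ⟨hji', hold⟩
          have hlt : p.getD i 0 < p.getD j 0 := by
            by_contra hle
            exact hnd (fun k hk1 hk2 => by
              by_cases hki : k = i
              · subst hki; omega
              · exact hold k hk1 (by omega))
          have hnotin : j ∉ r.1 := by
            intro hmr
            have := ((q2 j).mp hmr).2
            omega
          rw [q5 j hmem hnotin]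
          exact (dur_eq_of_drop_at p j i hin hji' hold hlt).symm
        · -- already resolved earlier
          have hnm : j ∉ stack := fun hm => hold ((hS j).mp hm).2
          rw [q4 j (Or.inl hnm)]
          exact hA j hji' hold

-- ---- the flush loop ----
lemma altFlush_length (n : Nat) (stack : List Nat) (answer : List Int) :
    (altFlush n stack answer).length = answer.length := by
  induction stack generalizing answer with
  | nil => simp [altFlush]
  | cons j rest ih => simp [altFlush, ih]

lemma altFlush_not_mem (n : Nat) (stack : List Nat) (answer : List Int) (j : Nat)
    (hj : j ∉ stack) : (altFlush n stack answer).getD j 0 = answer.getD j 0 := by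
  induction stack generalizing answer with
  | nil => simp [altFlush]
  | cons j' rest ih =>
    simp only [altFlush]
    rw [ih _ (fun hm => hj (List.mem_cons_of_mem _ hm))]
    exact getD_set_ne' answer j' j _ (fun h => hj (h ▸ List.mem_cons_self))

lemma altFlush_mem (n : Nat) (stack : List Nat) (answer : List Int) (j : Nat)
    (hnd : stack.Nodup) (hj : j ∈ stack) (hjl : j < answer.length) :
    (altFlush n stack answer).getD j 0 = (n : Int) - 1 - (j : Int) := by
  induction stack generalizing answer with
  | nil => simp at hj
  | cons j' rest ih =>
    simp only [altFlush]
    rcases List.mem_cons.mp hj with rfl | hm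
    · rw [altFlush_not_mem n rest _ j (List.nodup_cons.mp hnd).1]
      exact getD_set_self' answer j _ hjl
    · exact ih _ (List.nodup_cons.mp hnd).2 hm (by rw [List.length_set]; exact hjl)

-- ---- B-side main theorem ----
lemma solution_alt_eq_map (p : List Int) :
    solution_alt p = (List.range p.length).map (dur p) := by
  unfold solution_alt
  show altFlush p.length (altMain p (List.range p.length) [] (List.replicate p.length 0)).1
      (altMain p (List.range p.length) [] (List.replicate p.length 0)).2 = _
  have h0 : StkInv p 0 [] (List.replicate p.length 0) :=
    ⟨by simp, by simp, by simp, fun j hj => absurd hj (by omega)⟩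
  rw [List.range_eq_range']
  have hInv := altMain_inv p p.length 0 [] (List.replicate p.length 0) (by omega) h0
  obtain ⟨hL, hS, hP, hA⟩ := hInv
  set r := altMain p (List.range' 0 p.length) [] (List.replicate p.length 0) with hr
  have hnd : r.1.Nodup := hP.imp (fun hab => Nat.ne_of_gt hab.1)
  apply List.ext_getElem
  · rw [altFlush_length, hL, List.length_map, List.length_range']
  · intro k h1 h2
    have hkn : k < p.length := by
      rw [altFlush_length, hL] at h1; exact h1
    have hrhs : ((List.range' 0 p.length).map (dur p))[k] = dur p k := by
      simp [List.getElem_range']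
    rw [hrhs]
    have hget : (altFlush p.length r.1 r.2)[k] = (altFlush p.length r.1 r.2).getD k 0 := by
      simp [List.getD_eq_getElem?_getD, List.getElem?_eq_getElem h1]
    rw [hget]
    by_cases hm : k ∈ r.1
    · rw [altFlush_mem p.length r.1 r.2 k hnd hm (by omega)]
      rw [dur_eq_of_nodrop p k hkn ((hS k).mp hm).2]
    · rw [altFlush_not_mem _ _ _ _ hm]
      exact hA k hkn (fun h => hm ((hS k).mpr ⟨hkn, h⟩))

-- ===== VERDICT (by name: the statement is the Claim_ definition above) =====
theorem solution_spec : Claim_unchanged_solution := by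
  intro prices _ hD
  have hne : prices ≠ [] := hD
  rw [solution_eq_map prices hne, solution_alt_eq_map prices]

theorem solution_changed : Claim_changed_solution := by
  unfold Claim_changed_solution; decide

theorem solution_tight : Claim_exact_solution := by
  intro prices _ hD
  unfold D_solution at hD
  subst hD
  decide
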